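-- pv_equiv track=rewrite | github.com/adriablancafort/problemes-ap2 | grafs/treasures_in_map_1.py | dfs
-- ===== SOURCE A (Python) =====
-- from typing import List
--
-- def is_valid(map: List[List[str]], x: int, y: int, visited: List[List[bool]]) -> bool:
--     """Returns True if the coordinate is within the map, not previously visited, and not an obstacle."""
--     return 0 <= x < len(map) and 0 <= y < len(map[0]) and not visited[x][y] and map[x][y] != 'X'
--
-- def is_treasure(map: List[List[str]], x: int, y: int) -> bool:
--     """Returns True if the coordinate is a treasure."""
--     return map[x][y] == 't'
--
-- def dfs(map: List[List[str]], x: int, y: int, visited: List[List[bool]]) -> bool: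
--     """Performs a DFS on the map and checks if a treasure is reachable."""
--     if not is_valid(map, x, y, visited):
--         return False
--
--     visited[x][y] = True
--     if is_treasure(map, x, y):
--         return True
--
--     # Call dfs recursively for each direction
--     for dx, dy in [(-1, 0), (1, 0), (0, -1), (0, 1)]:
--         if dfs(map, x + dx, y + dy, visited):
--             return True
--
--     return False
-- ===== SOURCE B (Python) =====
-- from typing import List
--
-- def is_valid(map: List[List[str]], x: int, y: int, visited: List[List[bool]]) -> bool:
--     return 0 <= x < len(map) and 0 <= y < len(map[0]) and not visited[x][y] and map[x][y] != 'X'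
--
-- def is_treasure(map: List[List[str]], x: int, y: int) -> bool:
--     return map[x][y] == 't'
--
-- def dfs(map: List[List[str]], x: int, y: int, visited: List[List[bool]]) -> bool:
--     """Iterative DFS with an explicit LIFO stack; same visit pre-order as the recursive version."""
--     stack = [(x, y)]
--     while stack:
--         cx, cy = stack.pop()
--         if not is_valid(map, cx, cy, visited):
--             continue
--         visited[cx][cy] = True
--         if is_treasure(map, cx, cy):
--             return True
--         # pushed in reverse so pops come in the order (-1,0),(1,0),(0,-1),(0,1)
--         stack.extend([(cx, cy + 1), (cx, cy - 1), (cx + 1, cy), (cx - 1, cy)])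
--     return False
-- ===== Notes on version B (the rewrite author's own statement) =====
-- stated objective: alternative
-- what changed: The recursive DFS is replaced by an iterative loop over an explicit LIFO stack (neighbors pushed in reverse so the visit pre-order, the visited-array mutation and the return value are identical).
-- outside the precondition, e.g. on dfs([['t', 'a'], ['b']], 0, 0, [[False, False], [False, False]]): A returns True, B returns True
import Mathlib
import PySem

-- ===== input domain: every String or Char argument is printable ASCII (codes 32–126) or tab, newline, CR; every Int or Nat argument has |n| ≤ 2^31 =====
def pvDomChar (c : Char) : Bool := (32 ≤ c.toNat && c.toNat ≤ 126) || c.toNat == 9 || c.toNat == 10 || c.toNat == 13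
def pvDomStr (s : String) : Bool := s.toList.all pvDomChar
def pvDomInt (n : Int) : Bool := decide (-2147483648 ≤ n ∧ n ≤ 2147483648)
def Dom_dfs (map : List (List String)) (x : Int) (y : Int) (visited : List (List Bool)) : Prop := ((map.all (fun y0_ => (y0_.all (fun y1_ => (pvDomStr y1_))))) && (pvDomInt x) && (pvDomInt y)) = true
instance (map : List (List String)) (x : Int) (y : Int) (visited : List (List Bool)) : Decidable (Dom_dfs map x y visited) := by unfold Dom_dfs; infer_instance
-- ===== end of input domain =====

-- B is the same search decomposed iteratively: an explicit LIFO stack replaces the recursion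
-- (same visit pre-order, same return value; both Pythons mutate `visited` identically — the
-- theorems below are about the RETURN value).

-- ===== PORT A =====
-- shared helpers: the Python module's is_valid / is_treasure (used verbatim by A and by B)
def pvCellB (v : List (List Bool)) (a b : Nat) : Bool := (v.getD a []).getD b false
def pvCellS (m : List (List String)) (a b : Nat) : String := (m.getD a []).getD b ""

def isValidP (m : List (List String)) (x y : Int) (v : List (List Bool)) : Bool :=
  decide (0 ≤ x) && decide (x < (m.length : Int)) &&
  decide (0 ≤ y) && decide (y < ((m.headD []).length : Int)) &&
  !(pvCellB v x.toNat y.toNat) && !(pvCellS m x.toNat y.toNat == "X")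

def isTreasureP (m : List (List String)) (x y : Int) : Bool :=
  pvCellS m x.toNat y.toNat == "t"

-- visited[x][y] = True
def pvMark (v : List (List Bool)) (a b : Nat) : List (List Bool) :=
  v.set a ((v.getD a []).set b true)

-- fuel bound: total number of cells of `visited` (recursion depth of A is at most
-- the number of unvisited cells + 1, which this dominates)
def pvCells (v : List (List Bool)) : Nat := (v.map List.length).sum

-- A's recursion, with `visited` threaded as state (Python mutates it in place);
-- the fuel only makes the recursion structural — it never runs out on admitted inputs.
def dfsA (m : List (List String)) : Nat → Int → Int → List (List Bool) → Bool × List (List Bool)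
  | 0, _, _, v => (false, v)
  | n+1, x, y, v =>
    if isValidP m x y v then
      let v1 := pvMark v x.toNat y.toNat
      if isTreasureP m x y then (true, v1)
      else
        let r1 := dfsA m n (x-1) y v1
        if r1.1 then r1 else
        let r2 := dfsA m n (x+1) y r1.2
        if r2.1 then r2 else
        let r3 := dfsA m n x (y-1) r2.2
        if r3.1 then r3 else
        dfsA m n x (y+1) r3.2
    else (false, v)

def dfs (map : List (List String)) (x : Int) (y : Int) (visited : List (List Bool)) : Bool :=
  (dfsA map (pvCells visited + 1) x y visited).1

-- ===== PORT B =====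
-- B's while-loop over an explicit stack (head of the list = top of Python's list-stack);
-- fuel bounds the number of loop iterations (each pop is one iteration).
def loopB (m : List (List String)) : Nat → List (List Bool) → List (Int × Int) → Bool
  | 0, _, _ => false
  | _+1, _, [] => false
  | n+1, v, (x, y) :: s =>
    if isValidP m x y v then
      let v1 := pvMark v x.toNat y.toNat
      if isTreasureP m x y then true
      else loopB m n v1 ((x-1, y) :: (x+1, y) :: (x, y-1) :: (x, y+1) :: s)
    else loopB m n v s

def dfs_alt (map : List (List String)) (x : Int) (y : Int) (visited : List (List Bool)) : Bool :=
  loopB map (5 * pvCells visited + 2) visited [(x, y)]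

-- ===== PRECONDITION & SPEC =====
-- Pre_ excludes map/visited shapes that are ragged or smaller than the map when the start is
-- in range: on those A's search can raise IndexError mid-exploration (a start out of range is
-- always safe — A returns False before indexing).
def Pre_dfs (map : List (List String)) (x : Int) (y : Int) (visited : List (List Bool)) : Prop :=
  (¬ (0 ≤ x ∧ x < (map.length : Int))) ∨
  (¬ (0 ≤ y ∧ y < ((map.headD []).length : Int))) ∨
  (map.length ≤ visited.length ∧
    (∀ r ∈ map, (map.headD []).length ≤ r.length) ∧
    (∀ r ∈ visited, (map.headD []).length ≤ r.length))

instance (map : List (List String)) (x : Int) (y : Int) (visited : List (List Bool)) : Decidable (Pre_dfs map x y visited) := by unfold Pre_dfs; infer_instance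

def pvWitness_dfs : List (List String) × Int × Int × List (List Bool) :=
  ([[".", "t"], ["X", "."]], 0, 0, [[false, false], [false, false]])

def Spec_dfs (map : List (List String)) (x : Int) (y : Int) (visited : List (List Bool)) (out : Bool) : Prop := out = dfs_alt map x y visited
instance (map : List (List String)) (x : Int) (y : Int) (visited : List (List Bool)) (out : Bool) : Decidable (Spec_dfs map x y visited out) := by unfold Spec_dfs; infer_instance

-- ===== CLAIM (what is proved, stated in full; the proofs are below) =====
def Claim_equal_dfs : Prop := ∀ (map : List (List String)) (x : Int) (y : Int) (visited : List (List Bool)), Dom_dfs map x y visited → Pre_dfs map x y visited → Spec_dfs map x y visited (dfs map x y visited)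

-- ===== LEMMAS AND PROOFS =====

-- number of unvisited cells: the termination/stability measure
def cntF (v : List (List Bool)) : Nat := (v.map (fun r => r.count false)).sum

-- shape invariant: visited is at least as large as the region isValidP can admit
def Shp (m : List (List String)) (v : List (List Bool)) : Prop :=
  m.length ≤ v.length ∧ ∀ r ∈ v, (m.headD []).length ≤ r.length

theorem cntF_le_cells (v : List (List Bool)) : cntF v ≤ pvCells v := by
  induction v with
  | nil => simp [cntF, pvCells]
  | cons r t ih =>
    simp only [cntF, pvCells, List.map_cons, List.sum_cons] at *
    exact Nat.add_le_add (List.count_le_length) ih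

theorem count_set_false {r : List Bool} {b : Nat} (hb : b < r.length)
    (hf : r.getD b false = false) : (r.set b true).count false + 1 = r.count false := by
  induction r generalizing b with
  | nil => simp at hb
  | cons x t ih =>
    cases b with
    | zero => simp_all
    | succ b =>
      simp only [List.set_cons_succ, List.count_cons, List.length_cons,
        List.getD_cons_succ] at *
      have := ih (by omega) hf
      omega

theorem cntF_mark {v : List (List Bool)} {a b : Nat} (ha : a < v.length)
    (hb : b < (v.getD a []).length) (hf : (v.getD a []).getD b false = false) :
    cntF (pvMark v a b) + 1 = cntF v := by
  induction v generalizing a with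
  | nil => simp at ha
  | cons r t ih =>
    cases a with
    | zero =>
      simp only [pvMark, List.getD_cons_zero, List.set_cons_zero, cntF, List.map_cons,
        List.sum_cons] at *
      have := count_set_false hb hf
      omega
    | succ a =>
      simp only [pvMark, List.getD_cons_succ, List.set_cons_succ, cntF, List.map_cons,
        List.sum_cons, List.length_cons] at *
      have := ih (by omega) hb hf
      omega

theorem shp_mark {m : List (List String)} {v : List (List Bool)} {a b : Nat}
    (ha : a < v.length) (h : Shp m v) : Shp m (pvMark v a b) := by
  obtain ⟨h1, h2⟩ := h
  refine ⟨by simpa [pvMark] using h1, ?_⟩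
  intro r hr
  rcases List.mem_or_eq_of_mem_set hr with hr | hr
  · exact h2 r hr
  · subst hr
    rw [List.length_set]
    exact h2 _ (by rw [List.getD_eq_getElem _ _ ha]; exact List.getElem_mem ha)

-- what isValidP = true gives us about the input
theorem valid_dest {m : List (List String)} {x y : Int} {v : List (List Bool)}
    (h : isValidP m x y v = true) :
    0 ≤ x ∧ x < (m.length : Int) ∧ 0 ≤ y ∧ y < ((m.headD []).length : Int) ∧
      (v.getD x.toNat []).getD y.toNat false = false := by
  simp only [isValidP, pvCellB, Bool.and_eq_true, Bool.not_eq_true', decide_eq_true_eq] at h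
  tauto

theorem valid_bounds {m : List (List String)} {x y : Int} {v : List (List Bool)}
    (h : isValidP m x y v = true) (hs : Shp m v) :
    x.toNat < v.length ∧ y.toNat < (v.getD x.toNat []).length ∧
      (v.getD x.toNat []).getD y.toNat false = false := by
  obtain ⟨hx0, hx1, hy0, hy1, hf⟩ := valid_dest h
  have hxa : x.toNat < m.length := by omega
  have hxv : x.toNat < v.length := lt_of_lt_of_le hxa hs.1
  refine ⟨hxv, ?_, hf⟩
  have hmem : v.getD x.toNat [] ∈ v := by
    rw [List.getD_eq_getElem _ _ hxv]; exact List.getElem_mem hxv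
  have := hs.2 _ hmem
  omega

-- one valid step strictly decreases cntF and preserves Shp
theorem step_cnt {m : List (List String)} {x y : Int} {v : List (List Bool)}
    (h : isValidP m x y v = true) (hs : Shp m v) :
    cntF (pvMark v x.toNat y.toNat) + 1 = cntF v := by
  obtain ⟨h1, h2, h3⟩ := valid_bounds h hs
  exact cntF_mark h1 h2 h3

theorem step_shp {m : List (List String)} {x y : Int} {v : List (List Bool)}
    (h : isValidP m x y v = true) (hs : Shp m v) :
    Shp m (pvMark v x.toNat y.toNat) :=
  shp_mark (valid_bounds h hs).1 hs

-- unfolding of one valid, non-treasure step of A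
theorem dfsA_step (m : List (List String)) (n : Nat) (x y : Int) (v : List (List Bool))
    (hval : isValidP m x y v = true) (ht : isTreasureP m x y = false) :
    dfsA m (n+1) x y v =
      (if (dfsA m n (x-1) y (pvMark v x.toNat y.toNat)).1 then
        dfsA m n (x-1) y (pvMark v x.toNat y.toNat)
      else if (dfsA m n (x+1) y (dfsA m n (x-1) y (pvMark v x.toNat y.toNat)).2).1 then
        dfsA m n (x+1) y (dfsA m n (x-1) y (pvMark v x.toNat y.toNat)).2
      else if (dfsA m n x (y-1)
          (dfsA m n (x+1) y (dfsA m n (x-1) y (pvMark v x.toNat y.toNat)).2).2).1 then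
        dfsA m n x (y-1) (dfsA m n (x+1) y (dfsA m n (x-1) y (pvMark v x.toNat y.toNat)).2).2
      else
        dfsA m n x (y+1) (dfsA m n x (y-1)
          (dfsA m n (x+1) y (dfsA m n (x-1) y (pvMark v x.toNat y.toNat)).2).2).2) := by
  simp [dfsA, hval, ht]

-- A preserves the shape and never increases cntF
theorem dfsA_post (m : List (List String)) :
    ∀ (n : Nat) (x y : Int) (v : List (List Bool)), Shp m v →
      Shp m (dfsA m n x y v).2 ∧ cntF (dfsA m n x y v).2 ≤ cntF v := by
  intro n
  induction n with
  | zero => intro x y v hs; simpa [dfsA] using hs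
  | succ n ih =>
    intro x y v hs
    cases hval : isValidP m x y v with
    | false => simp only [dfsA, hval]; exact ⟨hs, le_refl _⟩
    | true =>
      have hc := step_cnt hval hs
      have hsh := step_shp hval hs
      cases ht : isTreasureP m x y with
      | true =>
        simp only [dfsA, hval, ht, if_true]
        exact ⟨hsh, by omega⟩
      | false =>
        rw [dfsA_step m n x y v hval ht]
        obtain ⟨s1, c1⟩ := ih (x-1) y _ hsh
        obtain ⟨s2, c2⟩ := ih (x+1) y _ s1
        obtain ⟨s3, c3⟩ := ih x (y-1) _ s2
        obtain ⟨s4, c4⟩ := ih x (y+1) _ s3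
        split_ifs <;> exact ⟨by assumption, by omega⟩

-- A's result does not depend on the fuel once the fuel exceeds cntF
theorem dfsA_stab (m : List (List String)) :
    ∀ (c : Nat) (v : List (List Bool)) (x y : Int) (n n' : Nat), cntF v ≤ c → Shp m v →
      cntF v < n → cntF v < n' → dfsA m n x y v = dfsA m n' x y v := by
  intro c
  induction c with
  | zero =>
    intro v x y n n' hc hs hn hn'
    obtain ⟨n, rfl⟩ : ∃ k, n = k + 1 := ⟨n - 1, by omega⟩
    obtain ⟨n', rfl⟩ : ∃ k, n' = k + 1 := ⟨n' - 1, by omega⟩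
    cases hval : isValidP m x y v with
    | false => simp [dfsA, hval]
    | true => have := step_cnt hval hs; omega
  | succ c ih =>
    intro v x y n n' hc hs hn hn'
    obtain ⟨n, rfl⟩ : ∃ k, n = k + 1 := ⟨n - 1, by omega⟩
    obtain ⟨n', rfl⟩ : ∃ k, n' = k + 1 := ⟨n' - 1, by omega⟩
    cases hval : isValidP m x y v with
    | false => simp [dfsA, hval]
    | true =>
      have hcnt := step_cnt hval hs
      have hsh := step_shp hval hs
      cases ht : isTreasureP m x y with
      | true => simp [dfsA, hval, ht]
      | false =>
        rw [dfsA_step m n x y v hval ht, dfsA_step m n' x y v hval ht]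
        have h1 : dfsA m n (x-1) y (pvMark v x.toNat y.toNat)
            = dfsA m n' (x-1) y (pvMark v x.toNat y.toNat) :=
          ih _ _ _ n n' (by omega) hsh (by omega) (by omega)
        rw [h1]
        obtain ⟨s1, c1⟩ := dfsA_post m n' (x-1) y (pvMark v x.toNat y.toNat) hsh
        have h2 : dfsA m n (x+1) y (dfsA m n' (x-1) y (pvMark v x.toNat y.toNat)).2
            = dfsA m n' (x+1) y (dfsA m n' (x-1) y (pvMark v x.toNat y.toNat)).2 :=
          ih _ _ _ n n' (by omega) s1 (by omega) (by omega)
        rw [h2]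
        obtain ⟨s2, c2⟩ := dfsA_post m n' (x+1) y _ s1
        have h3 : dfsA m n x (y-1)
              (dfsA m n' (x+1) y (dfsA m n' (x-1) y (pvMark v x.toNat y.toNat)).2).2
            = dfsA m n' x (y-1)
              (dfsA m n' (x+1) y (dfsA m n' (x-1) y (pvMark v x.toNat y.toNat)).2).2 :=
          ih _ _ _ n n' (by omega) s2 (by omega) (by omega)
        rw [h3]
        obtain ⟨s3, c3⟩ := dfsA_post m n' x (y-1) _ s2
        have h4 : dfsA m n x (y+1) ((dfsA m n' x (y-1)
              (dfsA m n' (x+1) y (dfsA m n' (x-1) y (pvMark v x.toNat y.toNat)).2).2).2)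
            = dfsA m n' x (y+1) ((dfsA m n' x (y-1)
              (dfsA m n' (x+1) y (dfsA m n' (x-1) y (pvMark v x.toNat y.toNat)).2).2).2) :=
          ih _ _ _ n n' (by omega) s3 (by omega) (by omega)
        rw [h4]

-- B's result does not depend on the fuel once the fuel exceeds 5·cntF + stack length
theorem loopB_stab (m : List (List String)) :
    ∀ (c : Nat) (v : List (List Bool)) (s : List (Int × Int)) (n n' : Nat),
      5 * cntF v + s.length ≤ c → Shp m v → c < n → c < n' →
      loopB m n v s = loopB m n' v s := by
  intro c
  induction c with
  | zero =>
    intro v s n n' hc hs hn hn'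
    obtain ⟨n, rfl⟩ : ∃ k, n = k + 1 := ⟨n - 1, by omega⟩
    obtain ⟨n', rfl⟩ : ∃ k, n' = k + 1 := ⟨n' - 1, by omega⟩
    match s, hc with
    | [], _ => simp [loopB]
  | succ c ih =>
    intro v s n n' hc hs hn hn'
    obtain ⟨n, rfl⟩ : ∃ k, n = k + 1 := ⟨n - 1, by omega⟩
    obtain ⟨n', rfl⟩ : ∃ k, n' = k + 1 := ⟨n' - 1, by omega⟩
    match s with
    | [] => simp [loopB]
    | (x, y) :: t =>
      cases hval : isValidP m x y v with
      | false =>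
        simp only [loopB, hval]
        exact ih _ _ n n' (by simp at hc ⊢; omega) hs (by omega) (by omega)
      | true =>
        have hcnt := step_cnt hval hs
        have hsh := step_shp hval hs
        cases ht : isTreasureP m x y with
        | true => simp [loopB, hval, ht]
        | false =>
          simp only [loopB, hval, ht, if_true]
          exact ih _ _ n n' (by simp at hc ⊢; omega) hsh (by omega) (by omega)

-- canonical-fuel wrappers used by the simulation argument
def dfsA' (m : List (List String)) (x y : Int) (v : List (List Bool)) : Bool × List (List Bool) :=
  dfsA m (cntF v + 1) x y v

def loopB' (m : List (List String)) (v : List (List Bool)) (s : List (Int × Int)) : Bool :=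
  loopB m (5 * cntF v + s.length + 1) v s

-- step lemmas for B's loop
theorem loopB_pop_invalid (m : List (List String)) (n : Nat) (x y : Int)
    (v : List (List Bool)) (s : List (Int × Int)) (hval : isValidP m x y v = false) :
    loopB m (n+1) v ((x, y) :: s) = loopB m n v s := by
  simp [loopB, hval]

theorem loopB_pop_valid (m : List (List String)) (n : Nat) (x y : Int)
    (v : List (List Bool)) (s : List (Int × Int)) (hval : isValidP m x y v = true)
    (ht : isTreasureP m x y = false) :
    loopB m (n+1) v ((x, y) :: s)
      = loopB m n (pvMark v x.toNat y.toNat)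
          ((x-1, y) :: (x+1, y) :: (x, y-1) :: (x, y+1) :: s) := by
  simp [loopB, hval, ht]

-- dfsA' post-conditions, phrased on the canonical fuel
theorem dfsA'_post (m : List (List String)) (x y : Int) (v : List (List Bool)) (hs : Shp m v) :
    Shp m (dfsA' m x y v).2 ∧ cntF (dfsA' m x y v).2 ≤ cntF v :=
  dfsA_post m (cntF v + 1) x y v hs

-- unfolding dfsA' one valid, non-treasure step, with all recursive calls at canonical fuel
theorem dfsA'_unfold (m : List (List String)) (x y : Int) (v : List (List Bool))
    (hval : isValidP m x y v = true) (ht : isTreasureP m x y = false) (hs : Shp m v) :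
    dfsA' m x y v =
      (if (dfsA' m (x-1) y (pvMark v x.toNat y.toNat)).1 then
        dfsA' m (x-1) y (pvMark v x.toNat y.toNat)
      else if (dfsA' m (x+1) y (dfsA' m (x-1) y (pvMark v x.toNat y.toNat)).2).1 then
        dfsA' m (x+1) y (dfsA' m (x-1) y (pvMark v x.toNat y.toNat)).2
      else if (dfsA' m x (y-1)
          (dfsA' m (x+1) y (dfsA' m (x-1) y (pvMark v x.toNat y.toNat)).2).2).1 then
        dfsA' m x (y-1) (dfsA' m (x+1) y (dfsA' m (x-1) y (pvMark v x.toNat y.toNat)).2).2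
      else
        dfsA' m x (y+1) (dfsA' m x (y-1)
          (dfsA' m (x+1) y (dfsA' m (x-1) y (pvMark v x.toNat y.toNat)).2).2).2) := by
  have hcnt := step_cnt hval hs
  have hsh := step_shp hval hs
  show dfsA m (cntF v + 1) x y v = _
  rw [dfsA_step m (cntF v) x y v hval ht]
  have h1 : dfsA m (cntF v) (x-1) y (pvMark v x.toNat y.toNat)
      = dfsA' m (x-1) y (pvMark v x.toNat y.toNat) :=
    dfsA_stab m (cntF (pvMark v x.toNat y.toNat)) _ _ _ _ _ (le_refl _) hsh
      (by omega) (by omega)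
  rw [h1]
  obtain ⟨s1, c1⟩ := dfsA'_post m (x-1) y (pvMark v x.toNat y.toNat) hsh
  have h2 : dfsA m (cntF v) (x+1) y (dfsA' m (x-1) y (pvMark v x.toNat y.toNat)).2
      = dfsA' m (x+1) y (dfsA' m (x-1) y (pvMark v x.toNat y.toNat)).2 :=
    dfsA_stab m (cntF (dfsA' m (x-1) y (pvMark v x.toNat y.toNat)).2) _ _ _ _ _
      (le_refl _) s1 (by omega) (by omega)
  rw [h2]
  obtain ⟨s2, c2⟩ := dfsA'_post m (x+1) y _ s1
  have h3 : dfsA m (cntF v) x (y-1)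
        (dfsA' m (x+1) y (dfsA' m (x-1) y (pvMark v x.toNat y.toNat)).2).2
      = dfsA' m x (y-1)
        (dfsA' m (x+1) y (dfsA' m (x-1) y (pvMark v x.toNat y.toNat)).2).2 :=
    dfsA_stab m _ _ _ _ _ _ (le_refl _) s2 (by omega) (by omega)
  rw [h3]
  obtain ⟨s3, c3⟩ := dfsA'_post m x (y-1) _ s2
  have h4 : dfsA m (cntF v) x (y+1) ((dfsA' m x (y-1)
        (dfsA' m (x+1) y (dfsA' m (x-1) y (pvMark v x.toNat y.toNat)).2).2).2)
      = dfsA' m x (y+1) ((dfsA' m x (y-1)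
        (dfsA' m (x+1) y (dfsA' m (x-1) y (pvMark v x.toNat y.toNat)).2).2).2) :=
    dfsA_stab m _ _ _ _ _ _ (le_refl _) s3 (by omega) (by omega)
  rw [h4]

-- the two easy cases of the simulation, shared by both induction branches
theorem sim_invalid (m : List (List String)) (v : List (List Bool)) (x y : Int)
    (s : List (Int × Int)) (hval : isValidP m x y v = false) :
    loopB' m v ((x, y) :: s)
      = (if (dfsA' m x y v).1 then true else loopB' m (dfsA' m x y v).2 s) := by
  have hA : dfsA' m x y v = (false, v) := by simp [dfsA', dfsA, hval]
  rw [hA]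
  simp only [loopB', List.length_cons]
  have h2 : 5 * cntF v + (s.length + 1) + 1 = (5 * cntF v + s.length + 1) + 1 := by omega
  rw [h2, loopB_pop_invalid m _ x y v s hval]
  simp

theorem sim_treasure (m : List (List String)) (v : List (List Bool)) (x y : Int)
    (s : List (Int × Int)) (hval : isValidP m x y v = true)
    (ht : isTreasureP m x y = true) :
    loopB' m v ((x, y) :: s)
      = (if (dfsA' m x y v).1 then true else loopB' m (dfsA' m x y v).2 s) := by
  have hA : dfsA' m x y v = (true, pvMark v x.toNat y.toNat) := by
    simp [dfsA', dfsA, hval, ht]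
  rw [hA]
  simp only [loopB', List.length_cons]
  have h2 : 5 * cntF v + (s.length + 1) + 1 = (5 * cntF v + s.length + 1) + 1 := by omega
  rw [h2]
  simp [loopB, hval, ht]

-- the stack loop simulates the recursion: popping (x,y) behaves like the call dfs(x,y)
theorem sim (m : List (List String)) :
    ∀ (c : Nat) (v : List (List Bool)) (x y : Int) (s : List (Int × Int)), cntF v ≤ c → Shp m v →
      loopB' m v ((x, y) :: s)
        = (if (dfsA' m x y v).1 then true else loopB' m (dfsA' m x y v).2 s) := by
  intro c
  induction c with
  | zero =>
    intro v x y s hc hs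
    cases hval : isValidP m x y v with
    | false => exact sim_invalid m v x y s hval
    | true => have := step_cnt hval hs; omega
  | succ c ih =>
    intro v x y s hc hs
    cases hval : isValidP m x y v with
    | false => exact sim_invalid m v x y s hval
    | true =>
      cases ht : isTreasureP m x y with
      | true => exact sim_treasure m v x y s hval ht
      | false =>
        have hcnt := step_cnt hval hs
        have hsh := step_shp hval hs
        -- unfold the loop one step: pop (x,y), mark it, push the four neighbours
        have e0 : loopB' m v ((x, y) :: s)
            = loopB m (5 * cntF v + s.length + 1) (pvMark v x.toNat y.toNat)
                ((x-1, y) :: (x+1, y) :: (x, y-1) :: (x, y+1) :: s) := by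
          simp only [loopB', List.length_cons]
          have h2 : 5 * cntF v + (s.length + 1) + 1 = (5 * cntF v + s.length + 1) + 1 := by
            omega
          rw [h2, loopB_pop_valid m _ x y v s hval ht]
        have e1 : loopB m (5 * cntF v + s.length + 1) (pvMark v x.toNat y.toNat)
              ((x-1, y) :: (x+1, y) :: (x, y-1) :: (x, y+1) :: s)
            = loopB' m (pvMark v x.toNat y.toNat)
              ((x-1, y) :: (x+1, y) :: (x, y-1) :: (x, y+1) :: s) := by
          simp only [loopB', List.length_cons]
          exact loopB_stab m (5 * cntF (pvMark v x.toNat y.toNat) + s.length + 4) _ _ _ _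
            (by simp; omega) hsh (by omega) (by simp; omega)
        rw [e0, e1]
        -- now process the four pushed neighbours through the induction hypothesis
        have i1 := ih (pvMark v x.toNat y.toNat) (x-1) y
          ((x+1, y) :: (x, y-1) :: (x, y+1) :: s) (by omega) hsh
        rw [i1]
        obtain ⟨s1, c1⟩ := dfsA'_post m (x-1) y (pvMark v x.toNat y.toNat) hsh
        have i2 := ih (dfsA' m (x-1) y (pvMark v x.toNat y.toNat)).2 (x+1) y
          ((x, y-1) :: (x, y+1) :: s) (by omega) s1
        rw [i2]
        obtain ⟨s2, c2⟩ := dfsA'_post m (x+1) y _ s1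
        have i3 := ih (dfsA' m (x+1) y (dfsA' m (x-1) y (pvMark v x.toNat y.toNat)).2).2
          x (y-1) ((x, y+1) :: s) (by omega) s2
        rw [i3]
        obtain ⟨s3, c3⟩ := dfsA'_post m x (y-1) _ s2
        have i4 := ih (dfsA' m x (y-1)
            (dfsA' m (x+1) y (dfsA' m (x-1) y (pvMark v x.toNat y.toNat)).2).2).2
          x (y+1) s (by omega) s3
        rw [i4]
        rw [dfsA'_unfold m x y v hval ht hs]
        cases hr1 : (dfsA' m (x-1) y (pvMark v x.toNat y.toNat)).1 <;>
          cases hr2 : (dfsA' m (x+1) y (dfsA' m (x-1) y (pvMark v x.toNat y.toNat)).2).1 <;>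
          cases hr3 : (dfsA' m x (y-1)
            (dfsA' m (x+1) y (dfsA' m (x-1) y (pvMark v x.toNat y.toNat)).2).2).1 <;>
          simp [hr1, hr2, hr3]

-- ===== VERDICT (by name: the statement is the Claim_ definition above) =====
theorem dfs_spec : Claim_equal_dfs := by
  intro map x y visited _ hpre
  show dfs map x y visited = dfs_alt map x y visited
  rcases hpre with h | h | h
  · -- start row out of range: both sides are immediately False
    have hval : isValidP map x y visited = false := by
      cases hv : isValidP map x y visited
      · rfl
      · obtain ⟨a, b, _, _, _⟩ := valid_dest hv
        exact absurd ⟨a, b⟩ h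
    have h2 : 5 * pvCells visited + 2 = (5 * pvCells visited + 1) + 1 := by omega
    simp only [dfs, dfs_alt, dfsA, hval, h2, loopB_pop_invalid map _ x y visited [] hval]
    simp [loopB]
  · -- start column out of range: both sides are immediately False
    have hval : isValidP map x y visited = false := by
      cases hv : isValidP map x y visited
      · rfl
      · obtain ⟨_, _, c, d, _⟩ := valid_dest hv
        exact absurd ⟨c, d⟩ h
    have h2 : 5 * pvCells visited + 2 = (5 * pvCells visited + 1) + 1 := by omega
    simp only [dfs, dfs_alt, dfsA, hval, h2, loopB_pop_invalid map _ x y visited [] hval]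
    simp [loopB]
  · -- well-shaped case: both ports compute at canonical fuel, then the simulation applies
    have hs : Shp map visited := ⟨h.1, h.2.2⟩
    have hcc := cntF_le_cells visited
    have e1 : dfsA map (pvCells visited + 1) x y visited = dfsA' map x y visited :=
      dfsA_stab map (cntF visited) visited x y _ _ (le_refl _) hs (by omega) (by omega)
    have e2 : loopB map (5 * pvCells visited + 2) visited [(x, y)]
        = loopB' map visited [(x, y)] := by
      simp only [loopB', List.length_cons, List.length_nil]
      exact loopB_stab map (5 * cntF visited + 1) visited [(x, y)] _ _
        (by simp) hs (by omega) (by omega)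
    have e3 := sim map (cntF visited) visited x y [] (le_refl _) hs
    simp only [dfs, dfs_alt, e1, e2, e3]
    cases h4 : (dfsA' map x y visited).1 <;> simp [loopB', loopB]
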